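-- pv_equiv track=rewrite | github.com/NinaBorys/big_integer | my_library.py | addition_stright
-- ===== SOURCE A (Python) =====
-- def addition_stright(arr1,arr2):
--     add_result=[]
--
--     if len(arr1)>len(arr2):
--         for i in range(0,len(arr1)-len(arr2),1):
--             arr2.insert(0,0)
--     elif len(arr2)>len(arr1):
--         for i in range(0,len(arr2)-len(arr1),1):
--             arr1.insert(0,0)
--
--     for i in range(len(arr1)-1,-1,-1):
--         add_result.append(arr1[i]+arr2[i])
--     add_result.append(0)
--     for i in range(len(arr1)-1,-1,-1):
--         if add_result[i]>65535:
--             add_result[i]-=65536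
--             # print (i,add_result[i])
--             # print (add_result[i+1])
--             add_result[i+1]+=1
--
--     add_result=add_result[::-1]
--     zero_index=0
--     for e in range(0,len(add_result),1):
--         if add_result[e] != 0:
--             zero_index = e
--             break
--
--     if zero_index!=0:
--         add_result=add_result[zero_index:]
--
--     return add_result
-- ===== SOURCE B (Python) =====
-- def addition_stright(arr1, arr2):
--     # One fused right-to-left pass indexing from the ends (no in-place padding,
--     # no stored sum array, no separate carry pass). carry records whether the
--     # previous (less significant) raw digit-sum overflowed, reproducing A's
--     # non-cascading carry rule exactly. Does not mutate its arguments (A pads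
--     # them in place); same return value.
--     i = len(arr1) - 1
--     j = len(arr2) - 1
--     carry = 0
--     out = []
--     while i >= 0 or j >= 0:
--         s = (arr1[i] if i >= 0 else 0) + (arr2[j] if j >= 0 else 0)
--         i -= 1
--         j -= 1
--         if s > 65535:
--             out.append(s - 65536 + carry)
--             carry = 1
--         else:
--             out.append(s + carry)
--             carry = 0
--     out.append(carry)
--     out.reverse()
--     for k, v in enumerate(out):
--         if v:
--             return out[k:]
--     return out
-- ===== Notes on version B (the rewrite author's own statement) =====
-- stated objective: alternative
-- what changed: B replaces A's four staged passes (in-place front-insert padding of the shorter array, building a sum list, a second index-mutating carry pass over that stored array, then a strip scan) by one fused right-to-left pass that indexes both arrays from their ends with a running carry flag (A's non-cascading rule: the carry out of a position is computed from that position's raw digit-sum), allocating only the output.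
import Mathlib
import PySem

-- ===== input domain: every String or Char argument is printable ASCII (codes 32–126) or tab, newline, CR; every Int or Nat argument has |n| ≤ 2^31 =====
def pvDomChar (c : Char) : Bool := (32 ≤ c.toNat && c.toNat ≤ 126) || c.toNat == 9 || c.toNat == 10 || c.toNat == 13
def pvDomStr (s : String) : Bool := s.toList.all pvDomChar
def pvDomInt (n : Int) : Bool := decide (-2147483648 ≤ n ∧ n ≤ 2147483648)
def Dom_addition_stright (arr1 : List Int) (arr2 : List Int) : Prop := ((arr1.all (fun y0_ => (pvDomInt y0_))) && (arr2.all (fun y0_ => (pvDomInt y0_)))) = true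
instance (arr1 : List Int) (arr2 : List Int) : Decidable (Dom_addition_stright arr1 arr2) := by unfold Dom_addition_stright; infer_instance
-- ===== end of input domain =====

-- B fuses A's four staged passes (in-place front-insert padding, sum list, separate carry
-- pass over the stored array, strip) into one right-to-left pass indexing from the ends with
-- a running carry flag (A's rule: carry out of a position comes from its raw digit-sum).
-- The proved equivalence is about the RETURN value only (Python A pads its arguments in
-- place; B never mutates them).

-- ===== PORT A =====
-- A's zero_index loop (scan for first nonzero index, default 0)
def pvScanA : List Int → Nat → Nat
  | [], _ => 0
  | x :: xs, e => if x ≠ 0 then e else pvScanA xs (e + 1)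

def addition_stright (arr1 : List Int) (arr2 : List Int) : List Int :=
  let p :=
    if arr1.length > arr2.length then
      (arr1, (PySem.List.pyRange 0 ((arr1.length : Int) - (arr2.length : Int)) 1).foldl
          (fun a _ => (0 : Int) :: a) arr2)
    else if arr2.length > arr1.length then
      ((PySem.List.pyRange 0 ((arr2.length : Int) - (arr1.length : Int)) 1).foldl
          (fun a _ => (0 : Int) :: a) arr1, arr2)
    else (arr1, arr2)
  let a1 := p.1
  let a2 := p.2
  let r0 := (PySem.List.pyRange ((a1.length : Int) - 1) (-1) (-1)).foldl
      (fun acc i => acc ++ [PySem.List.pyGetD a1 i 0 + PySem.List.pyGetD a2 i 0]) []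
  let r1 := r0 ++ [(0 : Int)]
  let r2 := (PySem.List.pyRange ((a1.length : Int) - 1) (-1) (-1)).foldl
      (fun acc i =>
        if PySem.List.pyGetD acc i 0 > 65535 then
          let acc' := PySem.List.pySetD acc i (PySem.List.pyGetD acc i 0 - 65536)
          PySem.List.pySetD acc' (i + 1) (PySem.List.pyGetD acc' (i + 1) 0 + 1)
        else acc) r1
  let r3 := r2.reverse   -- add_result[::-1]  (exact: PySem.List.slice?_none_none_neg_one)
  let zi := pvScanA r3 0
  if zi ≠ 0 then PySem.List.slice r3 (some (zi : Int)) none else r3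

-- ===== PORT B =====
-- Source B's while loop indexes both arrays from their ends; its obvious structural form is
-- recursion on the REVERSED lists with the same state (remaining digits, running carry);
-- it emits the little-endian digits and finally the leftover carry (out.append(carry)).
-- the phase of Source B's loop in which one index is already exhausted (its guard is false)
def pvAddTail : List Int → Int → List Int
  | [], c => [c]
  | y :: ys, c =>
      if y > 65535 then (y - 65536 + c) :: pvAddTail ys 1 else (y + c) :: pvAddTail ys 0

def pvAddLE : List Int → List Int → Int → List Int
  | [], l2, c => pvAddTail l2 c
  | x :: xs, [], c => pvAddTail (x :: xs) c
  | x :: xs, y :: ys, c =>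
      let s := x + y
      if s > 65535 then (s - 65536 + c) :: pvAddLE xs ys 1 else (s + c) :: pvAddLE xs ys 0

-- Source B's final strip loop: index of the first nonzero element, if any
def pvFirstNZ : List Int → Nat → Option Nat
  | [], _ => none
  | x :: xs, e => if x ≠ 0 then some e else pvFirstNZ xs (e + 1)

def addition_stright_alt (arr1 : List Int) (arr2 : List Int) : List Int :=
  let out := (pvAddLE arr1.reverse arr2.reverse 0).reverse
  match pvFirstNZ out 0 with
  | some e => out.drop e
  | none => out

-- ===== PRECONDITION & SPEC =====
def Spec_addition_stright (arr1 : List Int) (arr2 : List Int) (out : List Int) : Prop := out = addition_stright_alt arr1 arr2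
instance (arr1 : List Int) (arr2 : List Int) (out : List Int) : Decidable (Spec_addition_stright arr1 arr2 out) := by unfold Spec_addition_stright; infer_instance

-- ===== CLAIM (what is proved, stated in full; the proofs are below) =====
def Claim_equal_addition_stright : Prop := ∀ (arr1 : List Int) (arr2 : List Int), Dom_addition_stright arr1 arr2 → Spec_addition_stright arr1 arr2 (addition_stright arr1 arr2)

-- ===== LEMMAS AND PROOFS =====

theorem pvGetD_set (l : List Int) (i j : Nat) (v : Int) :
    (l.set i v).getD j 0 = if i = j ∧ i < l.length then v else l.getD j 0 := by
  simp only [List.getD_eq_getElem?_getD, List.getElem?_set]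
  split_ifs with h1 h2 h3 h3 <;> simp_all <;> omega

theorem pvMap_range_getD (l : List Int) :
    (List.range l.length).map (fun j => l.getD j 0) = l := by
  apply List.ext_getElem
  · simp
  · intro i h1 h2
    simp [List.getD_eq_getElem?_getD, List.getElem?_eq_getElem h2]

theorem pv_if_and (a b : Prop) [Decidable a] [Decidable b] (x : Int) :
    (if a ∧ b then x else 0) = if a then if b then x else 0 else 0 := by
  split_ifs <;> simp_all

def pvS (a1 a2 : List Int) : List Int :=
  (List.range a1.length).map (fun i => a1.getD i 0 + a2.getD i 0)

def pvRes (s : List Int) (n : Nat) : List Int :=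
  (if 0 < n ∧ 65535 < s.getD 0 0 then (1 : Int) else 0) ::
    (List.range n).map (fun i =>
      s.getD i 0 - (if 65535 < s.getD i 0 then 65536 else 0) +
      (if i + 1 < n ∧ 65535 < s.getD (i + 1) 0 then 1 else 0))

def pvStrip (l : List Int) : List Int :=
  match pvFirstNZ l 0 with
  | some e => l.drop e
  | none => l

def pvVal (r : List Int) (m : Nat) (j : Nat) : Int :=
  r.getD j 0 - (if j < m ∧ 65535 < r.getD j 0 then 65536 else 0) +
    (if 1 ≤ j ∧ j ≤ m ∧ 65535 < r.getD (j - 1) 0 then 1 else 0)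

-- getD of zero padding
theorem pvGetD_repl (k : Nat) (l : List Int) (i : Nat) :
    (List.replicate k (0 : Int) ++ l).getD i 0 = if k ≤ i then l.getD (i - k) 0 else 0 := by
  by_cases h : i < k
  · rw [if_neg (by omega)]
    rw [List.getD_eq_getElem?_getD, List.getElem?_append_left (by simpa using h)]
    simp [h]
  · rw [if_pos (by omega)]
    rw [List.getD_eq_getElem?_getD, List.getElem?_append_right (by simpa using h)]
    simp [List.getD_eq_getElem?_getD]

-- getD of the little-endian sum list with its appended 0
theorem pvGetD_revz (s : List Int) (j : Nat) :
    (s.reverse ++ [(0 : Int)]).getD j 0 = if j < s.length then s.getD (s.length - 1 - j) 0 else 0 := by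
  by_cases h : j < s.length
  · rw [if_pos h, List.getD_eq_getElem?_getD, List.getElem?_append_left (by simpa using h)]
    rw [List.getElem?_reverse (by simpa using h)]
    simp [List.getD_eq_getElem?_getD]
  · rw [if_neg h, List.getD_eq_getElem?_getD, List.getElem?_append_right (by simpa using h)]
    by_cases h2 : j = s.length
    · simp [h2]
    · have : j - s.reverse.length ≥ 1 := by simp; omega
      rcases Nat.exists_eq_add_of_le this with ⟨c, hc⟩
      simp

-- getD of a reversed list
theorem pvGetD_reverse (l : List Int) (i : Nat) :
    l.reverse.getD i 0 = if i < l.length then l.getD (l.length - 1 - i) 0 else 0 := by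
  by_cases h : i < l.length
  · rw [if_pos h, List.getD_eq_getElem?_getD, List.getElem?_reverse (by simpa using h)]
    simp [List.getD_eq_getElem?_getD]
  · rw [if_neg h, List.getD_eq_getElem?_getD, List.getElem?_eq_none (by simpa using h)]
    rfl

-- A's first loop builds the little-endian digit sums
theorem pvLoop1 (a1 a2 : List Int) :
    (PySem.List.pyRange ((a1.length : Int) - 1) (-1) (-1)).foldl
      (fun acc i => acc ++ [PySem.List.pyGetD a1 i 0 + PySem.List.pyGetD a2 i 0]) []
    = (pvS a1 a2).reverse := by
  rw [PySem.List.foldl_append_singleton_eq_map, List.nil_append]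
  rw [PySem.List.pyRange_neg_one_eq_reverse]
  have h1 : ((a1.length : Int) - 1) + 1 = (a1.length : Int) := by ring
  have h2 : (-1 : Int) + 1 = 0 := by ring
  rw [h1, h2, List.map_reverse]
  congr 1
  rw [PySem.List.pyRange_one]
  have h3 : ((a1.length : Int) - 0).toNat = a1.length := by omega
  rw [h3, List.map_map, pvS]
  apply List.map_congr_left
  intro k hk
  simp

-- reversing the carried little-endian list gives the big-endian result list
theorem pvRev (s : List Int) :
    ((List.range (s.length + 1)).map (pvVal (s.reverse ++ [(0 : Int)]) s.length)).reverse
      = pvRes s s.length := by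
  apply List.ext_getElem
  · simp [pvRes]
  · intro i h1 h2
    have hn : i < s.length + 1 := by simpa using h1
    rw [List.getElem_reverse]
    simp only [List.length_map, List.length_range]
    rw [List.getElem_map, List.getElem_range]
    rcases Nat.eq_zero_or_pos i with hi0 | hipos
    · subst hi0
      have e1 : s.length + 1 - 1 - 0 = s.length := by omega
      rw [e1]
      simp only [pvRes, pvVal, List.getElem_cons_zero]
      rw [pvGetD_revz, if_neg (show ¬ s.length < s.length by omega)]
      rw [if_neg (show ¬ (s.length < s.length ∧ 65535 < (0:Int)) by rintro ⟨a, _⟩; omega)]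
      rcases Nat.eq_zero_or_pos s.length with h0 | hpos
      · rw [if_neg (show ¬ (1 ≤ s.length ∧ s.length ≤ s.length ∧
            65535 < (s.reverse ++ [(0:Int)]).getD (s.length - 1) 0) by rintro ⟨a, _⟩; omega)]
        rw [if_neg (show ¬ (0 < s.length ∧ 65535 < s.getD 0 0) by rintro ⟨a, _⟩; omega)]
        norm_num
      · rw [pvGetD_revz, if_pos (show s.length - 1 < s.length by omega)]
        have e2 : s.length - 1 - (s.length - 1) = 0 := by omega
        rw [e2]
        by_cases hg : 65535 < s.getD 0 0
        · rw [if_pos (show 1 ≤ s.length ∧ s.length ≤ s.length ∧ 65535 < s.getD 0 0 from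
            ⟨by omega, by omega, hg⟩)]
          rw [if_pos (show 0 < s.length ∧ 65535 < s.getD 0 0 from ⟨hpos, hg⟩)]
          norm_num
        · rw [if_neg (show ¬ (1 ≤ s.length ∧ s.length ≤ s.length ∧ 65535 < s.getD 0 0) by
            rintro ⟨a, b, c⟩; exact hg c)]
          rw [if_neg (show ¬ (0 < s.length ∧ 65535 < s.getD 0 0) by rintro ⟨a, b⟩; exact hg b)]
          norm_num
    · obtain ⟨j, rfl⟩ : ∃ j, i = j + 1 := ⟨i - 1, by omega⟩
      have hj : j < s.length := by omega
      have hpr : (pvRes s s.length)[j + 1]'h2 = s.getD j 0 -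
          (if 65535 < s.getD j 0 then 65536 else 0) +
          (if j + 1 < s.length ∧ 65535 < s.getD (j + 1) 0 then 1 else 0) := by
        simp only [pvRes, List.getElem_cons_succ]
        rw [List.getElem_map, List.getElem_range]
      rw [hpr]
      set u := s.length + 1 - 1 - (j + 1) with hu
      have hu' : u = s.length - j - 1 := by omega
      simp only [pvVal]
      rw [pvGetD_revz, if_pos (show u < s.length by omega)]
      have e3 : s.length - 1 - u = j := by omega
      rw [e3]
      by_cases hc : j + 1 < s.length
      · rw [pvGetD_revz, if_pos (show u - 1 < s.length by omega)]
        have e4 : s.length - 1 - (u - 1) = j + 1 := by omega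
        rw [e4]
        by_cases hg1 : 65535 < s.getD j 0
        · rw [if_pos (show u < s.length ∧ 65535 < s.getD j 0 from ⟨by omega, hg1⟩),
            if_pos hg1]
          by_cases hg2 : 65535 < s.getD (j + 1) 0
          · rw [if_pos (show 1 ≤ u ∧ u ≤ s.length ∧ 65535 < s.getD (j + 1) 0 from
              ⟨by omega, by omega, hg2⟩)]
            rw [if_pos (show j + 1 < s.length ∧ 65535 < s.getD (j + 1) 0 from ⟨hc, hg2⟩)]
          · rw [if_neg (show ¬ (1 ≤ u ∧ u ≤ s.length ∧ 65535 < s.getD (j + 1) 0) by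
              rintro ⟨a, b, c⟩; exact hg2 c)]
            rw [if_neg (show ¬ (j + 1 < s.length ∧ 65535 < s.getD (j + 1) 0) by
              rintro ⟨a, b⟩; exact hg2 b)]
        · rw [if_neg (show ¬ (u < s.length ∧ 65535 < s.getD j 0) by
            rintro ⟨a, b⟩; exact hg1 b), if_neg hg1]
          by_cases hg2 : 65535 < s.getD (j + 1) 0
          · rw [if_pos (show 1 ≤ u ∧ u ≤ s.length ∧ 65535 < s.getD (j + 1) 0 from
              ⟨by omega, by omega, hg2⟩)]
            rw [if_pos (show j + 1 < s.length ∧ 65535 < s.getD (j + 1) 0 from ⟨hc, hg2⟩)]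
          · rw [if_neg (show ¬ (1 ≤ u ∧ u ≤ s.length ∧ 65535 < s.getD (j + 1) 0) by
              rintro ⟨a, b, c⟩; exact hg2 c)]
            rw [if_neg (show ¬ (j + 1 < s.length ∧ 65535 < s.getD (j + 1) 0) by
              rintro ⟨a, b⟩; exact hg2 b)]
      · have hu0 : u = 0 := by omega
        rw [if_neg (show ¬ (1 ≤ u ∧ u ≤ s.length ∧
            65535 < (s.reverse ++ [(0:Int)]).getD (u - 1) 0) by rintro ⟨a, _⟩; omega)]
        rw [if_neg (show ¬ (j + 1 < s.length ∧ 65535 < s.getD (j + 1) 0) by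
          rintro ⟨a, _⟩; exact hc a)]
        by_cases hg1 : 65535 < s.getD j 0
        · rw [if_pos (show u < s.length ∧ 65535 < s.getD j 0 from ⟨by omega, hg1⟩), if_pos hg1]
        · rw [if_neg (show ¬ (u < s.length ∧ 65535 < s.getD j 0) by
            rintro ⟨a, b⟩; exact hg1 b), if_neg hg1]

theorem pvScan_eq_firstNZ (l : List Int) (e : Nat) :
    pvScanA l e = (pvFirstNZ l e).getD 0 := by
  induction l generalizing e with
  | nil => rfl
  | cons x xs ih => by_cases hx : x = 0 <;> simp [pvScanA, pvFirstNZ, hx, ih]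

-- A's strip (scan + slice) equals the drop-at-first-nonzero strip
theorem pvStripA (l : List Int) :
    (if pvScanA l 0 ≠ 0 then PySem.List.slice l (some ((pvScanA l 0 : Nat) : Int)) none else l)
      = pvStrip l := by
  rw [pvScan_eq_firstNZ]
  unfold pvStrip
  cases h : pvFirstNZ l 0 with
  | none => simp
  | some e =>
    simp only [Option.getD_some]
    by_cases he : e = 0
    · subst he; simp
    · rw [if_pos he, PySem.List.slice_from_natCast]

set_option maxHeartbeats 2000000 in
theorem pvCarry (m : Nat) (r : List Int) (h : m < r.length) :
    (PySem.List.pyRange ((m : Int) - 1) (-1) (-1)).foldl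
      (fun acc i =>
        if PySem.List.pyGetD acc i 0 > 65535 then
          let acc' := PySem.List.pySetD acc i (PySem.List.pyGetD acc i 0 - 65536)
          PySem.List.pySetD acc' (i + 1) (PySem.List.pyGetD acc' (i + 1) 0 + 1)
        else acc) r
      = (List.range r.length).map (pvVal r m) := by
  induction m generalizing r with
  | zero =>
    rw [PySem.List.pyRange_neg_one_eq_nil (by norm_num)]
    simp only [List.foldl_nil]
    conv_lhs => rw [← pvMap_range_getD r]
    apply List.map_congr_left
    intro j hj
    simp only [pvVal]
    have h1 : ¬ (j < 0 ∧ 65535 < r.getD j 0) := by rintro ⟨a, _⟩; omega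
    have h2 : ¬ (1 ≤ j ∧ j ≤ 0 ∧ 65535 < r.getD (j - 1) 0) := by rintro ⟨a, b, _⟩; omega
    rw [if_neg h1, if_neg h2]; ring
  | succ m ih =>
    have hc : ((m + 1 : Nat) : Int) - 1 = (m : Int) := by push_cast; ring
    rw [hc, PySem.List.pyRange_neg_one_cons (by omega), List.foldl_cons]
    have hm : m < r.length := by omega
    simp only [PySem.List.pyGetD_natCast]
    by_cases hb : 65535 < r.getD m 0
    · rw [if_pos (by simpa using hb)]
      have hcast : ((m : Int) + 1) = ((m + 1 : Nat) : Int) := by push_cast; ring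
      simp only [hcast, PySem.List.pySetD_natCast, PySem.List.pyGetD_natCast]
      set v1 := r.getD m 0 - 65536 with hv1
      have hgd : (r.set m v1).getD (m + 1) 0 = r.getD (m + 1) 0 := by
        rw [pvGetD_set]; simp only [if_neg (by omega : ¬ (m = m + 1 ∧ m < r.length))]
      rw [hgd]
      set r' := (r.set m v1).set (m + 1) (r.getD (m + 1) 0 + 1) with hr'
      have hlen : r'.length = r.length := by simp [hr']
      rw [ih r' (by omega), hlen]
      apply List.map_congr_left
      intro j hj
      simp only [List.mem_range] at hj
      have hg : ∀ k : Nat, r'.getD k 0 =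
          if k = m + 1 then r.getD (m + 1) 0 + 1
          else if k = m then v1 else r.getD k 0 := by
        intro k
        rw [hr', pvGetD_set, pvGetD_set]
        simp only [List.length_set]
        split_ifs <;> first | rfl | omega
      rcases Nat.lt_trichotomy j m with hA | hA | hA
      · have Ej := hg j
        rw [if_neg (by omega), if_neg (by omega)] at Ej
        have Ej1 := hg (j - 1)
        rw [if_neg (by omega), if_neg (by omega)] at Ej1
        simp only [pvVal, pv_if_and, Ej, Ej1]
        split_ifs <;> omega
      · subst hA
        have Ej := hg j
        rw [if_neg (by omega), if_pos rfl] at Ej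
        by_cases hj0 : j = 0
        · subst hj0
          simp only [pvVal, pv_if_and, Ej]
          split_ifs <;> omega
        · have Ej1 := hg (j - 1)
          rw [if_neg (by omega), if_neg (by omega)] at Ej1
          simp only [pvVal, pv_if_and, Ej, Ej1]
          split_ifs <;> omega
      · by_cases hB : j = m + 1
        · subst hB
          have Ej := hg (m + 1)
          rw [if_pos rfl] at Ej
          have Ej1 := hg m
          rw [if_neg (by omega), if_pos rfl] at Ej1
          simp only [pvVal, pv_if_and, Nat.add_sub_cancel, Ej, Ej1]
          split_ifs <;> omega
        · have Ej := hg j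
          rw [if_neg hB, if_neg (by omega)] at Ej
          have Ej1 := hg (j - 1)
          split_ifs at Ej1 <;>
            simp only [pvVal, pv_if_and, Ej, Ej1] <;>
            split_ifs <;> omega
    · rw [if_neg (by simpa using hb)]
      rw [ih r hm]
      apply List.map_congr_left
      intro j hj
      simp only [List.mem_range] at hj
      rcases Nat.lt_trichotomy j m with hA | hA | hA
      · simp only [pvVal, pv_if_and]
        split_ifs <;> omega
      · subst hA
        simp only [pvVal, pv_if_and]
        split_ifs <;> omega
      · by_cases hB : j = m + 1
        · subst hB
          simp only [pvVal, pv_if_and, Nat.add_sub_cancel]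
          split_ifs <;> omega
        · simp only [pvVal, pv_if_and]
          split_ifs <;> omega

-- A's padding loop prepends k zeros
theorem pvPad_loop (k : Nat) (l : List Int) :
    (PySem.List.pyRange 0 (k : Int) 1).foldl (fun a _ => (0 : Int) :: a) l
      = List.replicate k 0 ++ l := by
  induction k with
  | zero => simp
  | succ k ih =>
    have hck : ((k + 1 : Nat) : Int) = (k : Int) + 1 := by push_cast; ring
    rw [hck, PySem.List.pyRange_one_succ_right (by positivity), List.foldl_append]
    simp [ih, List.replicate_succ]

-- both arrays padded with leading zeros to the common length
def pvPad (l : List Int) (n : Nat) : List Int := List.replicate (n - l.length) 0 ++ l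

-- A's body after the padding branches
def pvTail (a1 a2 : List Int) : List Int :=
  let r3 := ((PySem.List.pyRange ((a1.length : Int) - 1) (-1) (-1)).foldl
      (fun acc i =>
        if PySem.List.pyGetD acc i 0 > 65535 then
          let acc' := PySem.List.pySetD acc i (PySem.List.pyGetD acc i 0 - 65536)
          PySem.List.pySetD acc' (i + 1) (PySem.List.pyGetD acc' (i + 1) 0 + 1)
        else acc)
      (((PySem.List.pyRange ((a1.length : Int) - 1) (-1) (-1)).foldl
          (fun acc i => acc ++ [PySem.List.pyGetD a1 i 0 + PySem.List.pyGetD a2 i 0]) [])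
        ++ [(0 : Int)])).reverse
  if pvScanA r3 0 ≠ 0 then PySem.List.slice r3 (some ((pvScanA r3 0 : Nat) : Int)) none else r3

theorem pvLen_pad (l : List Int) (n : Nat) (h : l.length ≤ n) : (pvPad l n).length = n := by
  simp [pvPad]; omega

theorem pvA_branch (arr1 arr2 : List Int) :
    addition_stright arr1 arr2
      = pvTail (pvPad arr1 (max arr1.length arr2.length)) (pvPad arr2 (max arr1.length arr2.length)) := by
  unfold addition_stright
  rcases Nat.lt_trichotomy arr1.length arr2.length with hlt | heq | hgt
  · rw [if_neg (by omega : ¬ arr1.length > arr2.length), if_pos (by omega : arr2.length > arr1.length)]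
    have hc : (arr2.length : Int) - (arr1.length : Int) = ((arr2.length - arr1.length : Nat) : Int) := by omega
    rw [hc, pvPad_loop]
    have h1 : max arr1.length arr2.length - arr1.length = arr2.length - arr1.length := by omega
    have h2 : max arr1.length arr2.length - arr2.length = 0 := by omega
    simp only [pvPad, h1, h2, List.replicate_zero, List.nil_append]
    rfl
  · rw [if_neg (by omega : ¬ arr1.length > arr2.length), if_neg (by omega : ¬ arr2.length > arr1.length)]
    have h1 : max arr1.length arr2.length - arr1.length = 0 := by omega
    have h2 : max arr1.length arr2.length - arr2.length = 0 := by omega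
    simp only [pvPad, h1, h2, List.replicate_zero, List.nil_append]
    rfl
  · rw [if_pos (by omega : arr1.length > arr2.length)]
    have hc : (arr1.length : Int) - (arr2.length : Int) = ((arr1.length - arr2.length : Nat) : Int) := by omega
    rw [hc, pvPad_loop]
    have h1 : max arr1.length arr2.length - arr1.length = 0 := by omega
    have h2 : max arr1.length arr2.length - arr2.length = arr1.length - arr2.length := by omega
    simp only [pvPad, h1, h2, List.replicate_zero, List.nil_append]
    rfl

theorem pvTail_eq (a1 a2 : List Int) :
    pvTail a1 a2 = pvStrip (pvRes (pvS a1 a2) a1.length) := by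
  unfold pvTail
  rw [pvLoop1 a1 a2]
  have hl1 : ((pvS a1 a2).reverse ++ [(0 : Int)]).length = a1.length + 1 := by simp [pvS]
  rw [pvCarry a1.length _ (by rw [hl1]; omega), hl1]
  have hs2 : (pvS a1 a2).length = a1.length := by simp [pvS]
  rw [← hs2, pvRev (pvS a1 a2)]
  exact pvStripA _

-- ===== B-side lemmas =====

-- little-endian digit sums of two little-endian lists, padded to the longer length
def pvSumLE : List Int → List Int → List Int
  | [], [] => []
  | x :: xs, [] => x :: pvSumLE xs []
  | [], y :: ys => y :: pvSumLE [] ys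
  | x :: xs, y :: ys => (x + y) :: pvSumLE xs ys

theorem pvSumLE_nil_right (l : List Int) : pvSumLE l [] = l := by
  induction l with
  | nil => simp [pvSumLE]
  | cons x xs ih => simp [pvSumLE, ih]

theorem pvSumLE_nil_left (l : List Int) : pvSumLE [] l = l := by
  induction l with
  | nil => simp [pvSumLE]
  | cons x xs ih => simp [pvSumLE, ih]

theorem pvSumLE_length (a b : List Int) : (pvSumLE a b).length = max a.length b.length := by
  induction a generalizing b with
  | nil => rw [pvSumLE_nil_left]; simp
  | cons x xs ih =>
    cases b with
    | nil => rw [pvSumLE_nil_right]; simp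
    | cons y ys =>
      simp only [pvSumLE, List.length_cons, ih]
      omega

theorem pvSumLE_getD (a b : List Int) (i : Nat) :
    (pvSumLE a b).getD i 0 = a.getD i 0 + b.getD i 0 := by
  induction a generalizing b i with
  | nil => rw [pvSumLE_nil_left]; simp
  | cons x xs ih =>
    cases b with
    | nil => rw [pvSumLE_nil_right]; simp
    | cons y ys =>
      cases i with
      | zero => simp [pvSumLE]
      | succ i => simp only [pvSumLE, List.getD_cons_succ]; exact ih ys i

theorem pvAddLE_eq (a b : List Int) (c : Int) : pvAddLE a b c = pvAddTail (pvSumLE a b) c := by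
  induction a generalizing b c with
  | nil => rw [pvSumLE_nil_left]; simp [pvAddLE]
  | cons x xs ih =>
    cases b with
    | nil => rw [pvSumLE_nil_right]; simp [pvAddLE]
    | cons y ys =>
      simp only [pvAddLE, pvSumLE, pvAddTail]
      rw [ih ys 1, ih ys 0]

-- the fused pass equals the per-digit formula (carry out of a position = raw sum > 65535)
theorem pvAddTail_spec (u : List Int) (c : Int) :
    pvAddTail u c = ((List.range u.length).map (fun i =>
        u.getD i 0 - (if 65535 < u.getD i 0 then 65536 else 0) +
        (if i = 0 then c else if 65535 < u.getD (i - 1) 0 then 1 else 0)))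
      ++ [if u.length = 0 then c else if 65535 < u.getD (u.length - 1) 0 then 1 else 0] := by
  induction u generalizing c with
  | nil => simp [pvAddTail]
  | cons x us ih =>
    set c' : Int := if 65535 < x then 1 else 0 with hc'
    have hstep : pvAddTail (x :: us) c =
        (x - (if 65535 < x then 65536 else 0) + c) :: pvAddTail us c' := by
      simp only [pvAddTail]
      by_cases hb : x > 65535
      · rw [if_pos hb]
        congr 1
        · rw [if_pos (show (65535 : Int) < x from hb)]
        · rw [hc', if_pos (show (65535 : Int) < x from hb)]
      · rw [if_neg hb]
        congr 1
        · rw [if_neg (show ¬ (65535 : Int) < x from hb)]; ring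
        · rw [hc', if_neg (show ¬ (65535 : Int) < x from hb)]
    have hrec := ih c'
    rw [hstep, hrec]
    have hmap : (List.map (fun i =>
        us.getD i 0 - (if 65535 < us.getD i 0 then 65536 else 0) +
        (if i = 0 then c' else if 65535 < us.getD (i - 1) 0 then 1 else 0)) (List.range us.length))
      = List.map ((fun i =>
        (x :: us).getD i 0 - (if 65535 < (x :: us).getD i 0 then 65536 else 0) +
        (if i = 0 then c else if 65535 < (x :: us).getD (i - 1) 0 then 1 else 0)) ∘ Nat.succ)
        (List.range us.length) := by
      apply List.map_congr_left
      intro i _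
      simp only [Function.comp_apply, Nat.succ_eq_add_one, List.getD_cons_succ,
        Nat.add_sub_cancel]
      congr 1
      cases i with
      | zero => simp [hc']
      | succ k => simp
    have htop : (if us.length = 0 then c' else if 65535 < us.getD (us.length - 1) 0 then 1 else 0)
        = (if (x :: us).length = 0 then c
            else if 65535 < (x :: us).getD ((x :: us).length - 1) 0 then 1 else 0) := by
      cases us with
      | nil => simp [hc']
      | cons z zs =>
        simp only [List.length_cons, Nat.add_sub_cancel, List.getD_cons_succ]
        rw [if_neg (by omega : ¬ zs.length + 1 = 0), if_neg (by omega : ¬ zs.length + 1 + 1 = 0)]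
    rw [hmap, htop, List.length_cons, List.range_succ_eq_map, List.map_cons, List.map_map,
      List.cons_append]
    congr 1 <;> simp

-- the non-cascading per-digit formula reversed is exactly pvRes of the big-endian sums
theorem pvLE_rev (u : List Int) :
    (((List.range u.length).map (fun i =>
        u.getD i 0 - (if 65535 < u.getD i 0 then 65536 else 0) +
        (if i = 0 then (0 : Int) else if 65535 < u.getD (i - 1) 0 then 1 else 0)))
      ++ [if u.length = 0 then (0 : Int) else if 65535 < u.getD (u.length - 1) 0 then 1 else 0]).reverse
      = pvRes u.reverse u.length := by
  set n := u.length with hn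
  rw [List.reverse_append]
  simp only [List.reverse_cons, List.reverse_nil, List.nil_append, List.singleton_append]
  unfold pvRes
  congr 1
  · rcases Nat.eq_zero_or_pos n with h0 | hpos
    · rw [if_pos h0, if_neg (by omega : ¬ (0 < n ∧ 65535 < u.reverse.getD 0 0))]
    · rw [if_neg (by omega : ¬ n = 0), pvGetD_reverse, if_pos (by omega : 0 < u.length)]
      rw [show u.length - 1 - 0 = n - 1 by omega]
      by_cases hg : 65535 < u.getD (n - 1) 0
      · rw [if_pos hg, if_pos ⟨hpos, hg⟩]
      · rw [if_neg hg, if_neg (by rintro ⟨_, hb⟩; exact hg hb)]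
  · apply List.ext_getElem
    · simp
    · intro j h1 h2
      have hj : j < n := by simpa using h2
      rw [List.getElem_reverse]
      simp only [List.length_map, List.length_range]
      rw [List.getElem_map, List.getElem_range, List.getElem_map, List.getElem_range]
      have hrj : u.reverse.getD j 0 = u.getD (n - 1 - j) 0 := by
        rw [pvGetD_reverse, if_pos (by omega : j < u.length)]
      rw [hrj]
      by_cases hc : j + 1 < n
      · have hrj1 : u.reverse.getD (j + 1) 0 = u.getD (n - 1 - j - 1) 0 := by
          rw [pvGetD_reverse, if_pos (by omega : j + 1 < u.length),
            show u.length - 1 - (j + 1) = n - 1 - j - 1 by omega]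
        rw [hrj1, if_neg (show ¬ n - 1 - j = 0 by omega)]
        by_cases hg : 65535 < u.getD (n - 1 - j - 1) 0
        · rw [if_pos hg, if_pos (show j + 1 < n ∧ 65535 < u.getD (n - 1 - j - 1) 0 from ⟨hc, hg⟩)]
        · rw [if_neg hg, if_neg (show ¬ (j + 1 < n ∧ 65535 < u.getD (n - 1 - j - 1) 0) by
            rintro ⟨_, hb⟩; exact hg hb)]
      · rw [if_pos (show n - 1 - j = 0 by omega),
          if_neg (show ¬ (j + 1 < n ∧ 65535 < u.reverse.getD (j + 1) 0) by
            rintro ⟨ha, _⟩; exact hc ha)]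

-- B expressed through the shared characterisation
theorem pvB_eq (arr1 arr2 : List Int) :
    addition_stright_alt arr1 arr2
      = pvStrip (pvRes (pvSumLE arr1.reverse arr2.reverse).reverse
          (pvSumLE arr1.reverse arr2.reverse).length) := by
  unfold addition_stright_alt
  rw [pvAddLE_eq, pvAddTail_spec _ 0, pvLE_rev]
  rfl

-- the little-endian sums are the reverse of the padded big-endian sums
theorem pvSum_eq_rev (arr1 arr2 : List Int) :
    pvSumLE arr1.reverse arr2.reverse
      = (pvS (pvPad arr1 (max arr1.length arr2.length))
          (pvPad arr2 (max arr1.length arr2.length))).reverse := by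
  set n := max arr1.length arr2.length with hnn
  have hl1 : (pvPad arr1 n).length = n := pvLen_pad _ _ (by omega)
  have hl2 : (pvPad arr2 n).length = n := pvLen_pad _ _ (by omega)
  have hSlen : (pvS (pvPad arr1 n) (pvPad arr2 n)).length = n := by simp [pvS, hl1]
  have hSget : ∀ j, j < n → (pvS (pvPad arr1 n) (pvPad arr2 n)).getD j 0
      = (pvPad arr1 n).getD j 0 + (pvPad arr2 n).getD j 0 := by
    intro j hjn
    unfold pvS
    rw [List.getD_eq_getElem?_getD, List.getElem?_map]
    rw [List.getElem?_range (by rw [hl1]; exact hjn)]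
    rfl
  have hpadget : ∀ (l : List Int) (i : Nat), l.length ≤ n → i < n →
      (pvPad l n).getD (n - 1 - i) 0 = l.reverse.getD i 0 := by
    intro l i hle hi
    unfold pvPad
    rw [pvGetD_repl, pvGetD_reverse]
    by_cases h : i < l.length
    · rw [if_pos (by omega), if_pos h]
      congr 1
      omega
    · rw [if_neg (by omega), if_neg h]
  apply List.ext_getElem
  · simp only [pvSumLE_length, List.length_reverse, hSlen]
    omega
  · intro i h1 h2
    have hi : i < n := by rw [pvSumLE_length] at h1; simp at h1; omega
    have e1 : (pvSumLE arr1.reverse arr2.reverse)[i]'h1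
        = (pvSumLE arr1.reverse arr2.reverse).getD i 0 := by
      simp [List.getD_eq_getElem?_getD, List.getElem?_eq_getElem h1]
    have e2 : ((pvS (pvPad arr1 n) (pvPad arr2 n)).reverse)[i]'h2
        = ((pvS (pvPad arr1 n) (pvPad arr2 n)).reverse).getD i 0 := by
      simp [List.getD_eq_getElem?_getD, List.getElem?_eq_getElem h2]
    rw [e1, e2, pvSumLE_getD,
      ← hpadget arr1 i (by omega) hi, ← hpadget arr2 i (by omega) hi,
      pvGetD_reverse, hSlen, if_pos hi, hSget (n - 1 - i) (by omega)]

-- ===== VERDICT =====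
theorem addition_stright_spec : Claim_equal_addition_stright := by
  intro arr1 arr2 _
  unfold Spec_addition_stright
  rw [pvA_branch, pvTail_eq, pvB_eq, pvSum_eq_rev]
  congr 1
  rw [List.reverse_reverse]
  rw [List.length_reverse]
  have hS : (pvS (pvPad arr1 (max arr1.length arr2.length))
      (pvPad arr2 (max arr1.length arr2.length))).length
      = (pvPad arr1 (max arr1.length arr2.length)).length := by simp [pvS]
  rw [hS]
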